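-- pv_equiv track=rewrite | github.com/substrate-ai/substrate | pip-package/src/clients/DockerClient.py | remove_before_second_space
-- ===== SOURCE A (Python) =====
-- def remove_before_second_space(s):
--     """
--     Removes everything before the second space in the given string.
--
--     :param s: The input string.
--     :return: Modified string with everything before the second space removed.
--     """
--     # Initialize counters
--     space_count = 0
--     for i, char in enumerate(s):
--         if char == ' ':
--             space_count += 1
--             if space_count == 2:
--                 return s[i + 1:].strip()
--     return s  # Return the original string if less than two spaces are found
-- ===== SOURCE B (Python) =====
-- def remove_before_second_space(s):
--     parts = s.split(' ', 2)
--     if len(parts) > 2: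
--         return parts[2].strip()
--     return s
-- ===== Notes on version B (the rewrite author's own statement) =====
-- stated objective: idiomatic
-- what changed: Replaces the explicit enumerate loop with a space counter by a single str.split with maxsplit 2 followed by a length check and a strip of the third piece; the C-implemented split removes the per-character Python loop.
import Mathlib
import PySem

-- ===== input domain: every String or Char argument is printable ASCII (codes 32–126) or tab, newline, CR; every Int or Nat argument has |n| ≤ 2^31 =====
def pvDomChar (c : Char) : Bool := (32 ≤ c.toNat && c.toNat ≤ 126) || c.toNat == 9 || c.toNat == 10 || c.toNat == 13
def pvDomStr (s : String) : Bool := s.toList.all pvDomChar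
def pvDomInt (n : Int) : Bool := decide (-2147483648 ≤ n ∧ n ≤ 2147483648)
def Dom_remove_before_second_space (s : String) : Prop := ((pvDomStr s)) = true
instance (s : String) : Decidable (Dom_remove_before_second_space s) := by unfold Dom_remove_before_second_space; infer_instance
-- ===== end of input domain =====

-- B replaces A's explicit counting loop with one split on ' ' (maxsplit 2) plus a length check (idiomatic).

-- ===== PORT A =====
-- A's for-loop over enumerate(s) with a space counter, as structural recursion on the
-- character list; when the i-th character is reached the unconsumed tail IS s[i+1:].
def removeGoA : List Char → Nat → String → String
  | [], _, s => s
  | c :: rest, cnt, s =>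
    if c = ' ' then
      if cnt + 1 = 2 then String.ofList (PySem.Chars.strip rest)
      else removeGoA rest (cnt + 1) s
    else removeGoA rest cnt s

def remove_before_second_space (s : String) : String :=
  removeGoA s.toList 0 s

-- ===== PORT B =====
-- Source B: parts = s.split(' ', 2); if len(parts) > 2: return parts[2].strip(); return s
def remove_before_second_space_alt (s : String) : String :=
  let parts := PySem.Chars.splitOnMax s.toList [' '] 2
  if parts.length > 2 then String.ofList (PySem.Chars.strip (parts.getD 2 [])) else s

-- ===== PRECONDITION & SPEC =====
def Spec_remove_before_second_space (s : String) (out : String) : Prop := out = remove_before_second_space_alt s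
instance (s : String) (out : String) : Decidable (Spec_remove_before_second_space s out) := by unfold Spec_remove_before_second_space; infer_instance

-- ===== CLAIM (what is proved, stated in full; the proofs are below) =====
def Claim_equal_remove_before_second_space : Prop := ∀ (s : String), Dom_remove_before_second_space s → Spec_remove_before_second_space s (remove_before_second_space s)

-- ===== LEMMAS AND PROOFS =====

-- unfolding equations for PySem.Chars.splitOnMax.go (hold definitionally)
theorem go_succ_nil (sep : List Char) (fuel m : Nat) (cur : List Char) (acc : List (List Char)) :
    PySem.Chars.splitOnMax.go sep (fuel + 1) m [] cur acc = (cur.reverse :: acc).reverse := rfl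

theorem go_succ_cons (sep : List Char) (fuel m : Nat) (c : Char) (rest cur : List Char) (acc : List (List Char)) :
    PySem.Chars.splitOnMax.go sep (fuel + 1) m (c :: rest) cur acc =
      if m = 0 then ((cur.reverse ++ (c :: rest)) :: acc).reverse
      else if sep.isPrefixOf (c :: rest) then
        PySem.Chars.splitOnMax.go sep fuel (m - 1) ((c :: rest).drop sep.length) [] (cur.reverse :: acc)
      else PySem.Chars.splitOnMax.go sep fuel m rest (c :: cur) acc := rfl

theorem go_m0 (fuel : Nat) (l cur : List Char) (acc : List (List Char)) :
    PySem.Chars.splitOnMax.go [' '] fuel 0 l cur acc = ((cur.reverse ++ l) :: acc).reverse := by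
  cases fuel with
  | zero => rfl
  | succ n =>
    cases l with
    | nil => simp [go_succ_nil]
    | cons c rest => simp [go_succ_cons]

theorem go_m1 : ∀ (l : List Char) (fuel : Nat), l.length < fuel → ∀ (cur : List Char) (acc : List (List Char)),
    PySem.Chars.splitOnMax.go [' '] fuel 1 l cur acc =
      if ' ' ∈ l then
        (((l.dropWhile (· ≠ ' ')).tail) :: (cur.reverse ++ l.takeWhile (· ≠ ' ')) :: acc).reverse
      else ((cur.reverse ++ l) :: acc).reverse := by
  intro l
  induction l with
  | nil =>
    intro fuel h cur acc
    cases fuel with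
    | zero => omega
    | succ n => simp [go_succ_nil]
  | cons c rest ih =>
    intro fuel h cur acc
    cases fuel with
    | zero => simp at h
    | succ n =>
      rw [go_succ_cons]
      by_cases hc : c = ' '
      · subst hc
        simp [List.isPrefixOf, go_m0, List.dropWhile, List.takeWhile]
      · have hp : ([' '] : List Char).isPrefixOf (c :: rest) = false := by
          simp [List.isPrefixOf]; intro h'; exact absurd h'.symm hc
        simp only [hp]
        rw [ih n (by simp at h; omega)]
        by_cases hm : ' ' ∈ rest
        · simp [hm, hc, List.dropWhile, List.takeWhile, Ne.symm hc]
        · simp [hm, Ne.symm hc]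

theorem go_m2 : ∀ (l : List Char) (fuel : Nat), l.length < fuel → ∀ (cur : List Char) (acc : List (List Char)),
    PySem.Chars.splitOnMax.go [' '] fuel 2 l cur acc =
      if ' ' ∈ l then
        (if ' ' ∈ (l.dropWhile (· ≠ ' ')).tail then
          ((((l.dropWhile (· ≠ ' ')).tail).dropWhile (· ≠ ' ')).tail ::
            ((l.dropWhile (· ≠ ' ')).tail).takeWhile (· ≠ ' ') ::
            (cur.reverse ++ l.takeWhile (· ≠ ' ')) :: acc).reverse
        else
          ((l.dropWhile (· ≠ ' ')).tail :: (cur.reverse ++ l.takeWhile (· ≠ ' ')) :: acc).reverse)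
      else ((cur.reverse ++ l) :: acc).reverse := by
  intro l
  induction l with
  | nil =>
    intro fuel h cur acc
    cases fuel with
    | zero => omega
    | succ n => simp [go_succ_nil]
  | cons c rest ih =>
    intro fuel h cur acc
    cases fuel with
    | zero => simp at h
    | succ n =>
      rw [go_succ_cons]
      by_cases hc : c = ' '
      · subst hc
        have hlen : rest.length < n := by simp at h; omega
        rw [if_neg (by omega)]
        have hpre : ([' '] : List Char).isPrefixOf (' ' :: rest) = true := by
          simp [List.isPrefixOf]
        rw [if_pos hpre]
        simp only [show ([' '] : List Char).length = 1 from rfl, List.drop_one,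
          List.tail_cons, show (2 - 1 : Nat) = 1 from rfl]
        rw [go_m1 rest n hlen]
        by_cases hm : ' ' ∈ rest
        · simp [hm, List.dropWhile, List.takeWhile]
        · simp [hm, List.dropWhile, List.takeWhile]
      · have hp : ([' '] : List Char).isPrefixOf (c :: rest) = false := by
          simp [List.isPrefixOf]; intro h'; exact absurd h'.symm hc
        simp only [hp]
        rw [if_neg (by omega)]
        rw [ih n (by simp at h; omega)]
        by_cases hm : ' ' ∈ rest
        · simp [hm, hc, List.dropWhile, List.takeWhile, Ne.symm hc]
        · simp [hm, Ne.symm hc]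

theorem goA_one : ∀ (l : List Char) (s : String),
    removeGoA l 1 s =
      if ' ' ∈ l then String.ofList (PySem.Chars.strip ((l.dropWhile (· ≠ ' ')).tail)) else s := by
  intro l
  induction l with
  | nil => intro s; simp [removeGoA]
  | cons c rest ih =>
    intro s
    by_cases hc : c = ' '
    · subst hc; simp [removeGoA, List.dropWhile]
    · simp only [removeGoA, if_neg hc]
      rw [ih]
      by_cases hm : ' ' ∈ rest
      · simp [hm, hc, List.dropWhile, Ne.symm hc]
      · simp [hm, Ne.symm hc]

theorem goA_zero : ∀ (l : List Char) (s : String),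
    removeGoA l 0 s =
      if ' ' ∈ l then removeGoA ((l.dropWhile (· ≠ ' ')).tail) 1 s else s := by
  intro l
  induction l with
  | nil => intro s; simp [removeGoA]
  | cons c rest ih =>
    intro s
    by_cases hc : c = ' '
    · subst hc; simp [removeGoA, List.dropWhile]
    · simp only [removeGoA, if_neg hc]
      rw [ih]
      by_cases hm : ' ' ∈ rest
      · simp [hm, hc, List.dropWhile, Ne.symm hc]
      · simp [hm, Ne.symm hc]

-- ===== VERDICT (by name: the statement is the Claim_ definition above) =====
theorem remove_before_second_space_spec : Claim_equal_remove_before_second_space := by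
  unfold Claim_equal_remove_before_second_space
  intro s _
  unfold Spec_remove_before_second_space remove_before_second_space remove_before_second_space_alt
  have hsplit : PySem.Chars.splitOnMax s.toList [' '] 2 =
      PySem.Chars.splitOnMax.go [' '] (s.toList.length + 1) 2 s.toList [] [] := by
    simp [PySem.Chars.splitOnMax]
  rw [goA_zero, hsplit, go_m2 _ _ (by omega)]
  by_cases h1 : ' ' ∈ s.toList
  · rw [if_pos h1, if_pos h1, goA_one]
    simp only [ne_eq, decide_not]
    by_cases h2 : ' ' ∈ (s.toList.dropWhile (fun x => !decide (x = ' '))).tail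
    · simp [h2]
    · simp [h2]
  · simp [h1]
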